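-- pv_equiv track=rewrite | github.com/ekeleshian/lettergame | letter_game.py | secret_dict
-- ===== SOURCE A (Python) =====
-- def secret_dict(string):
-- 	secret_dict = {}
-- 	for idx, value in enumerate(string):
-- 		if value not in secret_dict:
-- 			secret_dict[value] = [idx]
-- 		else:
-- 			secret_dict[value].append(idx)
-- 	return secret_dict
-- ===== SOURCE B (Python) =====
-- def secret_dict(string):
--     return {ch: [i for i, c in enumerate(string) if c == ch]
--             for ch in dict.fromkeys(string)}
-- ===== Notes on version B (the rewrite author's own statement) =====
-- stated objective: alternative
-- what changed: Instead of one pass that accumulates index lists in a dict with a membership branch, B first computes the distinct characters with dict.fromkeys and builds the result as a dict comprehension, re-scanning the string once per distinct character to collect its indices.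
import Mathlib
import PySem

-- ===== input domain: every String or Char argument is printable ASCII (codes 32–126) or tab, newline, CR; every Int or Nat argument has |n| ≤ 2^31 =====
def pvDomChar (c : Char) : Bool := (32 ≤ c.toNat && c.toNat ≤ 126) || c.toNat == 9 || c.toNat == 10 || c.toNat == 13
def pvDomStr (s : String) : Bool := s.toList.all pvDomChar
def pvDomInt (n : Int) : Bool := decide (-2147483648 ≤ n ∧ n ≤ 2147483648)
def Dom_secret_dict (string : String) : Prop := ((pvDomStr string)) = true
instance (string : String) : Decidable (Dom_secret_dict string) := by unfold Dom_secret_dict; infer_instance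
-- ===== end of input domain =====

-- B builds the result as a comprehension over the distinct characters (dict.fromkeys order),
-- re-scanning the string once per distinct character, instead of A's single accumulating pass.

-- ===== PORT A =====
-- A: d = {}; for idx, value in enumerate(string): if value not in d: d[value]=[idx] else d[value].append(idx); return d
def secret_dict (string : String) : List (String × List Int) :=
  ((PySem.List.enumerate string.toList 0).foldl
    (fun (d : PySem.Dict String (List Int)) p =>
      let value := String.singleton p.2
      if d.contains value = false then d.insert value [p.1]
      else d.insert value (d.getD value [] ++ [p.1]))
    PySem.Dict.empty).items

-- ===== PORT B =====
-- B: {ch: [i for i, c in enumerate(string) if c == ch] for ch in dict.fromkeys(string)}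
def secret_dict_alt (string : String) : List (String × List Int) :=
  let cs := string.toList.map String.singleton
  (PySem.List.dedup cs).map (fun ch =>
    (ch, ((PySem.List.enumerate cs 0).filter (fun p => p.2 == ch)).map (·.1)))

-- ===== PRECONDITION & SPEC =====
def Spec_secret_dict (string : String) (out : List (String × List Int)) : Prop := out = secret_dict_alt string
instance (string : String) (out : List (String × List Int)) : Decidable (Spec_secret_dict string out) := by unfold Spec_secret_dict; infer_instance

-- ===== CLAIM (what is proved, stated in full; the proofs are below) =====
def Claim_equal_secret_dict : Prop := ∀ (string : String), Dom_secret_dict string → Spec_secret_dict string (secret_dict string)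

-- ===== LEMMAS AND PROOFS =====

-- A's branchy step is extensionally the 'modify: append the index' step.
theorem step_eq_modify (d : PySem.Dict String (List Int)) (p : Int × Char) :
    (let value := String.singleton p.2
     if d.contains value = false then d.insert value [p.1]
     else d.insert value (d.getD value [] ++ [p.1]))
    = d.modify (String.singleton p.2) [] (· ++ [p.1]) := by
  show (if d.contains (String.singleton p.2) = false then _ else _) = _
  split_ifs with h
  · show d.insert (String.singleton p.2) [p.1]
        = d.insert (String.singleton p.2) (d.getD (String.singleton p.2) [] ++ [p.1])
    rw [PySem.Dict.getD_of_not_contains d [] h, List.nil_append]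
  · rfl

theorem enumerate_map {α β : Type} (f : α → β) (xs : List α) (s : Int) :
    PySem.List.enumerate (xs.map f) s
      = (PySem.List.enumerate xs s).map (fun p => (p.1, f p.2)) := by
  induction xs generalizing s with
  | nil => rfl
  | cons x xs ih => simp [PySem.List.enumerate_cons, ih]


-- ===== VERDICT (by name: the statement is the Claim_ definition above) =====
theorem secret_dict_spec : Claim_equal_secret_dict := by
  intro string _
  unfold Spec_secret_dict secret_dict secret_dict_alt
  -- rewrite A's fold as a fold of 'modify … (· ++ [idx])' over key/value pairs
  have hstep :
      (PySem.List.enumerate string.toList 0).foldl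
        (fun (d : PySem.Dict String (List Int)) p =>
          let value := String.singleton p.2
          if d.contains value = false then d.insert value [p.1]
          else d.insert value (d.getD value [] ++ [p.1]))
        PySem.Dict.empty
      = ((PySem.List.enumerate string.toList 0).map
          (fun p => (String.singleton p.2, p.1))).foldl
          (fun (d : PySem.Dict String (List Int)) q => d.modify q.1 [] (· ++ [q.2]))
          PySem.Dict.empty := by
    rw [List.foldl_map]
    exact PySem.List.foldl_congr_mem _ _ _ _ (fun d p _ => step_eq_modify d p)
  rw [hstep]
  set l := (PySem.List.enumerate string.toList 0).map
      (fun p => (String.singleton p.2, p.1)) with hl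
  set D := l.foldl (fun (d : PySem.Dict String (List Int)) q => d.modify q.1 [] (· ++ [q.2]))
      PySem.Dict.empty with hD
  have hkeysmap : l.map (·.1) = string.toList.map String.singleton := by
    rw [hl, List.map_map]
    conv_rhs => rw [← PySem.List.map_snd_enumerate (xs := string.toList) (s := 0), List.map_map]
    rfl
  have hnodup : D.keys.Nodup := by
    have := PySem.Dict.nodup_keys_foldl_modify_key l (·.1) []
      (fun d q => (· ++ [q.2])) PySem.Dict.empty (by simp [pysem])
    simpa [hD] using this
  have hkeys : D.keys = PySem.List.dedup (string.toList.map String.singleton) := by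
    have := PySem.Dict.keys_foldl_modify_key (l := l) (key := (·.1)) (d0 := [])
      (f := fun d q => (· ++ [q.2])) (d := PySem.Dict.empty)
    rw [hD, this, hkeysmap]
    simp [pysem, PySem.Set.update, ← PySem.Set.ofList_eq_foldl]
  rw [PySem.Dict.items_eq_map_keys D hnodup [], hkeys]
  apply List.map_congr_left
  intro k hk
  have hval : D.getD k [] = (l.filter (fun p => p.1 == k)).map (·.2) := by
    have := PySem.Dict.getD_foldl_modify_append (l := l) (d := PySem.Dict.empty) (c := k)
    simpa [hD] using this
  rw [hval, hl, List.filter_map, List.map_map, enumerate_map, List.filter_map, List.map_map]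
  rfl
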